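-- pv_equiv track=rewrite | github.com/YijingGong/Bernardo-project-clean | RUFAS/units.py | simplify_units
-- ===== SOURCE A (Python) =====
-- def simplify_units(numerator: dict[str, int], denominator: dict[str, int]) -> tuple[dict[str, int], dict[str, int]]:
--     """
--     Simplify the units by cancelling out common units in the numerator and denominator.
--
--     Parameters
--     ----------
--     numerator : dict[str, int]
--         A dictionary representing the units in the numerator with keys as unit names and values as exponents.
--     denominator : dict[str, int]
--         A dictionary representing the units in the denominator with keys as unit names and values as exponents.
--
--     Returns
--     -------
--     tuple[dict[str, int], dict[str, int]]
--         A tuple containing two dictionaries: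
--         - The first dictionary represents the simplified numerator units with non-zero exponents.
--         - The second dictionary represents the simplified denominator units with non-zero exponents.
--     """
--     combined_numerator = numerator.copy()
--     combined_denominator = denominator.copy()
--
--     for unit in list(combined_numerator.keys()):
--         if unit in combined_denominator:
--             new_exponent = combined_numerator[unit] - combined_denominator[unit]
--             if new_exponent == 0:
--                 del combined_numerator[unit]
--                 del combined_denominator[unit]
--             else:
--                 combined_numerator[unit] = new_exponent
--                 del combined_denominator[unit]
--
--     return combined_numerator, combined_denominator
-- ===== SOURCE B (Python) =====
-- def simplify_units(numerator: dict[str, int], denominator: dict[str, int]) -> tuple[dict[str, int], dict[str, int]]: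
--     # Divide and conquer: split the numerator items in halves, thread the
--     # remaining-denominator dict through the recursion, concatenate the
--     # (disjoint-keyed) numerator halves; the arguments are never mutated.
--     def go(pairs, den):
--         if not pairs:
--             return {}, den
--         if len(pairs) == 1:
--             u, e = pairs[0]
--             if u in den:
--                 d = e - den.pop(u)
--                 return ({u: d} if d != 0 else {}), den
--             return {u: e}, den
--         mid = len(pairs) // 2
--         left_num, den = go(pairs[:mid], den)
--         right_num, den = go(pairs[mid:], den)
--         return {**left_num, **right_num}, den
--     return go(list(numerator.items()), dict(denominator))
-- ===== Notes on version B (the rewrite author's own statement) =====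
-- stated objective: alternative
-- what changed: A makes copies of both dicts and mutates them in one loop over a snapshot of the numerator's keys; B is a divide-and-conquer recursion over the numerator items that splits them in halves, threads the shrinking remaining-denominator dict through the recursion (popping a matched unit at each leaf), and merges the disjoint-keyed numerator halves; the arguments are never mutated.
import Mathlib
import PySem

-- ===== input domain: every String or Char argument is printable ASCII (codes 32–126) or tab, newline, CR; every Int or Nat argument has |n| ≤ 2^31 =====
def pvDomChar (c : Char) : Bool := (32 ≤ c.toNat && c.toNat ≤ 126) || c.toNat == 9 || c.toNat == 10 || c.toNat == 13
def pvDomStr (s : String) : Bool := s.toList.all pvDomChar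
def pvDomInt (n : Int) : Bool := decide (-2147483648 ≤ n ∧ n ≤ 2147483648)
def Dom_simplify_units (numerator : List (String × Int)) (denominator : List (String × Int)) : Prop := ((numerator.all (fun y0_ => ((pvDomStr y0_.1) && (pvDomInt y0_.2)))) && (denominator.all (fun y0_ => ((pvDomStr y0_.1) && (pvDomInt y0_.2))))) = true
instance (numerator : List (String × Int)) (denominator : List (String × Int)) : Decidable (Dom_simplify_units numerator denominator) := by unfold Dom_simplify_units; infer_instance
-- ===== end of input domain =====

-- B cancels units by divide and conquer over the numerator items, threading the shrinking denominator through the recursion, instead of A's single key-snapshot loop mutating copies of both dicts (objective: alternative; same return value).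

-- ===== PORT A =====
-- the body of A's loop, 'if unit in combined_denominator: …', acting on the state (combined_numerator, combined_denominator)
def pvStepA (s : PySem.Dict String Int × PySem.Dict String Int) (unit : String) :
    PySem.Dict String Int × PySem.Dict String Int :=
  if s.2.contains unit then
    let newExp := s.1.getD unit 0 - s.2.getD unit 0   -- 'unit' is a key of both dicts here, so getD is the [] lookup
    if newExp = 0 then (s.1.erase unit, s.2.erase unit)
    else (s.1.insert unit newExp, s.2.erase unit)
  else s

def simplify_units (numerator : List (String × Int)) (denominator : List (String × Int)) :
    (List (String × Int)) × (List (String × Int)) :=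
  let combined_numerator := PySem.Dict.ofList numerator
  let combined_denominator := PySem.Dict.ofList denominator
  -- 'for unit in list(combined_numerator.keys()):' — a snapshot of the keys, folded over the mutated pair
  let res := combined_numerator.keys.foldl pvStepA (combined_numerator, combined_denominator)
  (res.1.items, res.2.items)

-- ===== PORT B =====
-- B's recursive helper 'go(pairs, den)': split the numerator items in halves, thread the remaining denominator
def pvGo : List (String × Int) → PySem.Dict String Int → PySem.Dict String Int × PySem.Dict String Int
  | [], den => (PySem.Dict.empty, den)
  | [(u, e)], den =>
      -- 'if u in den: d = e - den.pop(u)' — pop is lookup-then-erase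
      match den.get? u with
      | some de => ((if e - de ≠ 0 then PySem.Dict.mk [(u, e - de)] else PySem.Dict.empty), den.erase u)
      | none => (PySem.Dict.mk [(u, e)], den)
  | p1 :: p2 :: rest, den =>
      let mid := (p1 :: p2 :: rest).length / 2
      let l := pvGo ((p1 :: p2 :: rest).take mid) den
      let r := pvGo ((p1 :: p2 :: rest).drop mid) l.2
      -- '{**left_num, **right_num}': exact as list concatenation because the two halves' keys are disjoint
      (PySem.Dict.mk (l.1.items ++ r.1.items), r.2)
termination_by pairs _ => pairs.length
decreasing_by
  · simp [List.length_take]; omega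
  · simp; omega

def simplify_units_alt (numerator : List (String × Int)) (denominator : List (String × Int)) :
    (List (String × Int)) × (List (String × Int)) :=
  -- 'return go(list(numerator.items()), dict(denominator))'
  let res := pvGo (PySem.Dict.ofList numerator).items (PySem.Dict.ofList denominator)
  (res.1.items, res.2.items)

-- ===== PRECONDITION & SPEC =====
def Spec_simplify_units (numerator : List (String × Int)) (denominator : List (String × Int)) (out : (List (String × Int)) × (List (String × Int))) : Prop := out = simplify_units_alt numerator denominator
instance (numerator : List (String × Int)) (denominator : List (String × Int)) (out : (List (String × Int)) × (List (String × Int))) : Decidable (Spec_simplify_units numerator denominator out) := by unfold Spec_simplify_units; infer_instance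

-- ===== CLAIM (what is proved, stated in full; the proofs are below) =====
def Claim_equal_simplify_units : Prop := ∀ (numerator : List (String × Int)) (denominator : List (String × Int)), Dom_simplify_units numerator denominator → Spec_simplify_units numerator denominator (simplify_units numerator denominator)

-- ===== LEMMAS AND PROOFS =====

-- what A's loop does to one numerator entry, as a function of the key snapshot ks and the starting denominator cd
def pvNumF (ks : List String) (cd : PySem.Dict String Int) (p : String × Int) : Option (String × Int) :=
  if p.1 ∈ ks then
    match cd.get? p.1 with
    | some de => if p.2 - de = 0 then none else some (p.1, p.2 - de)
    | none => some p
  else some p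

-- what B's recursion does to one numerator entry
def pvG (cd : PySem.Dict String Int) (p : String × Int) : Option (String × Int) :=
  match cd.get? p.1 with
  | some de => if p.2 - de = 0 then none else some (p.1, p.2 - de)
  | none => some p

lemma pv_contains_erase {ν : Type} (d : PySem.Dict String ν) (k k' : String) (h : k' ≠ k) :
    (d.erase k).contains k' = d.contains k' := by
  simp only [PySem.Dict.contains, PySem.Dict.erase, List.any_filter]
  apply congrArg
  funext p
  by_cases hp : p.1 = k' <;> simp [hp, h]

lemma pv_get?_erase {ν : Type} (d : PySem.Dict String ν) (k k' : String) (h : k' ≠ k) :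
    (d.erase k).get? k' = d.get? k' := by
  simp only [PySem.Dict.get?, PySem.Dict.erase, List.find?_filter]
  apply congrArg
  apply congrArg (List.find? · d.items)
  funext p
  by_cases hp : p.1 = k' <;> simp [hp, h]

-- lookup in a dict built from a key-filtered item list, on a key the filter keeps
lemma pv_get?_filter (d : PySem.Dict String Int) (ks : List String) (k : String) (h : k ∉ ks) :
    (PySem.Dict.mk (d.items.filter (fun p => !(decide (p.1 ∈ ks))))).get? k = d.get? k := by
  simp only [PySem.Dict.get?, List.find?_filter]
  apply congrArg
  apply congrArg (List.find? · d.items)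
  funext p
  by_cases hp : p.1 = k <;> simp [hp, h]

lemma pv_nodup_keys_erase {ν : Type} (d : PySem.Dict String ν) (k : String)
    (h : d.keys.Nodup) : (d.erase k).keys.Nodup := by
  simp only [PySem.Dict.keys, PySem.Dict.erase] at *
  exact h.sublist (List.Sublist.map _ List.filter_sublist)

lemma pv_val_eq (cn : PySem.Dict String Int) (p : String × Int) (hp : p ∈ cn.items)
    (hnd : cn.keys.Nodup) {v : Int} (hv : cn.get? p.1 = some v) : p.2 = v := by
  have := PySem.Dict.get?_of_mem_items cn (k := p.1) (v := p.2) (by simpa using hp) hnd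
  rw [this] at hv
  exact Option.some_inj.mp hv

-- A's loop, characterised: the numerator entries are rewritten pointwise, the denominator keeps the keys outside the snapshot
lemma foldA_char (ks : List String) (cn cd : PySem.Dict String Int)
    (hks : ks.Nodup) (hcn : ∀ k ∈ ks, cn.contains k = true) (hnd : cn.keys.Nodup) :
    ks.foldl pvStepA (cn, cd) =
      (PySem.Dict.mk (cn.items.filterMap (pvNumF ks cd)),
       PySem.Dict.mk (cd.items.filter (fun p => !(decide (p.1 ∈ ks))))) := by
  induction ks generalizing cn cd with
  | nil =>
    simp [pvNumF]
  | cons u t ih =>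
    have hu : u ∉ t := (List.nodup_cons.mp hks).1
    have ht : t.Nodup := (List.nodup_cons.mp hks).2
    have hcu : cn.contains u = true := hcn u (by simp)
    rw [List.foldl_cons]
    by_cases hc : cd.contains u = true
    · obtain ⟨de, hde⟩ : ∃ de, cd.get? u = some de := by
        cases hg : cd.get? u with
        | none => rw [PySem.Dict.get?_eq_none_iff_contains] at hg; simp [hg] at hc
        | some de => exact ⟨de, rfl⟩
      obtain ⟨v, hv⟩ : ∃ v, cn.get? u = some v := by
        cases hg : cn.get? u with
        | none => rw [PySem.Dict.get?_eq_none_iff_contains] at hg; simp [hg] at hcu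
        | some v => exact ⟨v, rfl⟩
      have hvD : cn.getD u 0 = v := PySem.Dict.getD_of_get?_eq_some _ 0 hv
      have hdeD : cd.getD u 0 = de := PySem.Dict.getD_of_get?_eq_some _ 0 hde
      have hden : ((cd.erase u).items.filter (fun p => !(decide (p.1 ∈ t))))
          = cd.items.filter (fun p => !(decide (p.1 ∈ u :: t))) := by
        show ((cd.items.filter _).filter _) = _
        rw [List.filter_filter]
        apply List.filter_congr
        intro p _
        by_cases hp : p.1 = u <;> simp [hp]
      by_cases h0 : v - de = 0
      · have hstep : pvStepA (cn, cd) u = (cn.erase u, cd.erase u) := by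
          simp [pvStepA, hc, hvD, hdeD, h0]
        rw [hstep, ih (cn.erase u) (cd.erase u) ht
              (fun k hk => by rw [pv_contains_erase _ _ _ (fun he => hu (by rw [← he]; exact hk))]; exact hcn k (by simp [hk]))
              (pv_nodup_keys_erase _ _ hnd)]
        refine Prod.ext ?_ (congrArg PySem.Dict.mk hden)
        apply congrArg PySem.Dict.mk
        show ((cn.items.filter _).filterMap _) = _
        rw [List.filterMap_filter]
        apply List.filterMap_congr
        intro p hp
        by_cases hpu : p.1 = u
        · have hval : p.2 = v := pv_val_eq cn p hp hnd (hpu ▸ hv)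
          simp [pvNumF, hpu, hde, hval, h0]
        · simp [pvNumF, hpu, pv_get?_erase _ _ _ hpu]
      · have hstep : pvStepA (cn, cd) u = (cn.insert u (v - de), cd.erase u) := by
          simp [pvStepA, hc, hvD, hdeD, h0]
        have hcontains' : ∀ k ∈ t, (cn.insert u (v - de)).contains k = true := by
          intro k hk
          rw [PySem.Dict.contains_insert]
          simp [hcn k (by simp [hk])]
        have hnd' : (cn.insert u (v - de)).keys.Nodup := by
          rw [PySem.Dict.keys_insert_of_contains _ _ hcu]; exact hnd
        rw [hstep, ih _ _ ht hcontains' hnd']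
        refine Prod.ext ?_ (congrArg PySem.Dict.mk hden)
        apply congrArg PySem.Dict.mk
        rw [PySem.Dict.items_insert_of_contains _ _ hcu, List.filterMap_map]
        apply List.filterMap_congr
        intro p hp
        by_cases hpu : p.1 = u
        · have hval : p.2 = v := pv_val_eq cn p hp hnd (hpu ▸ hv)
          simp [Function.comp, pvNumF, hpu, hde, hval, h0, hu]
        · simp [Function.comp, pvNumF, hpu, pv_get?_erase _ _ _ hpu]
    · have hstep : pvStepA (cn, cd) u = (cn, cd) := by simp [pvStepA, hc]
      have hgu : cd.get? u = none := (PySem.Dict.get?_eq_none_iff_contains cd u).mpr (by simpa using hc)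
      rw [hstep, ih cn cd ht (fun k hk => hcn k (by simp [hk])) hnd]
      refine Prod.ext ?_ ?_
      · apply congrArg PySem.Dict.mk
        apply List.filterMap_congr
        intro p hp
        by_cases hpu : p.1 = u
        · simp [pvNumF, hpu, hgu, hu]
        · simp [pvNumF, hpu]
      · apply congrArg PySem.Dict.mk
        apply List.filter_congr
        intro p hp
        have hpu : p.1 ≠ u := by
          intro he
          have : cd.contains u = true := by
            simp only [PySem.Dict.contains, List.any_eq_true]
            exact ⟨p, by simpa using hp, by simp [he]⟩
          simp [this] at hc
        simp [hpu]

-- B's recursion, characterised: same pointwise rewriting of the numerator entries, same key filter on the denominator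
lemma goB_char (pairs : List (String × Int)) (den : PySem.Dict String Int)
    (hnd : (pairs.map Prod.fst).Nodup) :
    pvGo pairs den =
      (PySem.Dict.mk (pairs.filterMap (pvG den)),
       PySem.Dict.mk (den.items.filter (fun p => !(decide (p.1 ∈ pairs.map Prod.fst))))) := by
  match pairs with
  | [] =>
    rw [pvGo]
    refine Prod.ext rfl ?_
    apply PySem.Dict.ext
    show den.items = (den.items.filter _)
    exact (List.filter_eq_self.mpr (fun p _ => by simp)).symm
  | [(u, e)] =>
    rw [pvGo]
    cases hg : den.get? u with
    | some de =>
      refine Prod.ext ?_ ?_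
      · by_cases h0 : e - de = 0
        · simp [pvG, hg, h0]
          rfl
        · simp [pvG, hg, h0]
      · show den.erase u = _
        simp only [PySem.Dict.erase]
        apply congrArg PySem.Dict.mk
        apply List.filter_congr
        intro p _
        by_cases hp : p.1 = u <;> simp [hp]
    | none =>
      refine Prod.ext (by simp [pvG, hg]) ?_
      apply PySem.Dict.ext
      show den.items = (den.items.filter _)
      refine (List.filter_eq_self.mpr (fun p hp => ?_)).symm
      have : p.1 ≠ u := by
        intro he
        rw [PySem.Dict.get?_eq_none_iff_not_mem_keys] at hg
        exact hg (he ▸ PySem.Dict.mem_keys_of_mem_items _ hp)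
      simp [this]
  | p1 :: p2 :: rest =>
    rw [pvGo]
    have hlen : 1 ≤ (p1 :: p2 :: rest).length / 2 := by simp; omega
    set ps := p1 :: p2 :: rest with hps
    set mid := ps.length / 2 with hmid
    have hsplit : ps.take mid ++ ps.drop mid = ps := List.take_append_drop _ _
    have hmap : (ps.take mid).map Prod.fst ++ (ps.drop mid).map Prod.fst = ps.map Prod.fst := by
      rw [← List.map_append, hsplit]
    have hndl : ((ps.take mid).map Prod.fst).Nodup := by
      rw [← hmap] at hnd; exact hnd.of_append_left
    have hndr : ((ps.drop mid).map Prod.fst).Nodup := by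
      rw [← hmap] at hnd; exact hnd.of_append_right
    have hdisj : ∀ k ∈ (ps.drop mid).map Prod.fst, k ∉ (ps.take mid).map Prod.fst := by
      intro k hk hk'
      rw [← hmap] at hnd
      exact (List.disjoint_of_nodup_append hnd) hk' hk
    have ihl := goB_char (ps.take mid) den hndl
    rw [ihl]
    have ihr := goB_char (ps.drop mid)
        (PySem.Dict.mk (den.items.filter (fun p => !(decide (p.1 ∈ (ps.take mid).map Prod.fst))))) hndr
    rw [ihr]
    refine Prod.ext ?_ ?_
    · apply congrArg PySem.Dict.mk
      show (ps.take mid).filterMap (pvG den) ++ (ps.drop mid).filterMap _ = ps.filterMap (pvG den)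
      have : (ps.drop mid).filterMap
            (pvG (PySem.Dict.mk (den.items.filter (fun p => !(decide (p.1 ∈ (ps.take mid).map Prod.fst))))))
          = (ps.drop mid).filterMap (pvG den) := by
        apply List.filterMap_congr
        intro p hp
        have hk : p.1 ∉ (ps.take mid).map Prod.fst :=
          hdisj p.1 (List.mem_map_of_mem hp) 
        unfold pvG
        rw [pv_get?_filter den _ _ hk]
      rw [this, ← List.filterMap_append, hsplit]
    · apply congrArg PySem.Dict.mk
      show ((den.items.filter _).filter _) = _
      rw [List.filter_filter]
      apply List.filter_congr
      intro p _
      by_cases h1 : p.1 ∈ (ps.take mid).map Prod.fst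
      · have h3 : p.1 ∈ ps.map Prod.fst := by rw [← hmap]; exact List.mem_append_left _ h1
        rw [List.map_take] at h1
        simp [h1, h3]
      · by_cases h2 : p.1 ∈ (ps.drop mid).map Prod.fst
        · have h3 : p.1 ∈ ps.map Prod.fst := by rw [← hmap]; exact List.mem_append_right _ h2
          rw [List.map_take] at h1
          rw [List.map_drop] at h2
          simp [h1, h2, h3]
        · have h3 : p.1 ∉ ps.map Prod.fst := by
            rw [← hmap]
            intro h
            rcases List.mem_append.mp h with h | h
            exacts [h1 h, h2 h]
          rw [List.map_take] at h1
          rw [List.map_drop] at h2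
          simp [h1, h2, h3]
termination_by pairs.length
decreasing_by
  · simp [List.length_take]; omega
  · simp; omega

-- ===== VERDICT (by name: the statement is the Claim_ definition above) =====
theorem simplify_units_spec : Claim_equal_simplify_units := by
  intro numerator denominator _
  unfold Spec_simplify_units simplify_units simplify_units_alt
  dsimp only
  rw [foldA_char (PySem.Dict.ofList numerator).keys (PySem.Dict.ofList numerator) (PySem.Dict.ofList denominator)
        (PySem.Dict.nodup_keys_ofList _)
        (fun k hk => (PySem.Dict.contains_iff_mem_keys _ k).mpr hk)
        (PySem.Dict.nodup_keys_ofList _)]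
  rw [goB_char (PySem.Dict.ofList numerator).items (PySem.Dict.ofList denominator)
        (PySem.Dict.nodup_keys_ofList _)]
  refine Prod.ext ?_ ?_
  · show (PySem.Dict.ofList numerator).items.filterMap _ = (PySem.Dict.ofList numerator).items.filterMap _
    apply List.filterMap_congr
    intro p hp
    have hk : p.1 ∈ (PySem.Dict.ofList numerator).keys := PySem.Dict.mem_keys_of_mem_items _ hp
    simp [pvNumF, pvG, hk]
  · show (PySem.Dict.ofList denominator).items.filter _ = (PySem.Dict.ofList denominator).items.filter _
    apply List.filter_congr
    intro p _
    rfl
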